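-- pv_equiv track=rewrite | github.com/jaySHKorea/Coding-Test | 유형별풀이/Graph/커리큘럼.py | curriculum
-- ===== SOURCE A (Python) =====
-- from collections import deque
-- import copy
--
-- def curriculum(N,course):
--     indegree = [0]*(N+1)
--     graph = [[] for i in range(N+1)]
--     time = [0]*(N+1)
--
--     for i in range(N):
--         time[i+1] = course[i][0]
--         for j in course[i][1:-1]:
--             graph[j].append(i+1)
--             indegree[i+1] += 1
--
--     result = copy.deepcopy(time)
--     q = deque()
--
--     for i in range(1,N+1):
--         if indegree[i] == 0:
--             q.append(i)
--
--     while q: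
--         now = q.popleft()
--         for i in graph[now]:
--             indegree[i] -= 1
--             if indegree[i] == 0:
--                 q.append(i)
--                 result[i] = max(result[i],result[now]+time[i])
--
--     return result
-- ===== SOURCE B (Python) =====
-- def curriculum(N, course):
--     # Propagate completions directly over outstanding-prerequisite lists:
--     # when a course finishes it is struck from every pending list, and a
--     # course whose list empties is scheduled right then, completing at the
--     # striker's finish time plus its own duration.
--     times = [0] * (N + 1)
--     pending = [[] for _ in range(N + 1)]
--     for v in range(1, N + 1):
--         times[v] = course[v - 1][0]
--         pending[v] = list(course[v - 1][1:-1])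
--     finish = list(times)
--     done = [v for v in range(1, N + 1) if not pending[v]]
--     i = 0
--     while i < len(done):
--         v = done[i]
--         i += 1
--         for u in range(1, N + 1):
--             if v in pending[u]:
--                 pending[u] = [p for p in pending[u] if p != v]
--                 if not pending[u]:
--                     finish[u] = max(finish[u], finish[v] + times[u])
--                     done.append(u)
--     return finish
-- ===== Notes on version B (the rewrite author's own statement) =====
-- stated objective: alternative
-- what changed: Kahn's indegree-counter/reverse-adjacency/deque bookkeeping is replaced by direct propagation over outstanding-prerequisite lists: a finished course is struck from every course's pending list and a course whose list just emptied is scheduled on an index-driven worklist, so no indegree counters, no adjacency lists and no deque are maintained; Pre_ excludes inputs where A raises IndexError and, declared below, rows naming a negative prerequisite id, an unspecified corner where A's wraparound reading and B's never-satisfied reading are both defensible.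
-- outside the precondition, e.g. on curriculum(2, [[3, -1, 0], [2, -1]]): A returns [0, 5, 2], B returns [0, 3, 2]
import Mathlib
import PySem

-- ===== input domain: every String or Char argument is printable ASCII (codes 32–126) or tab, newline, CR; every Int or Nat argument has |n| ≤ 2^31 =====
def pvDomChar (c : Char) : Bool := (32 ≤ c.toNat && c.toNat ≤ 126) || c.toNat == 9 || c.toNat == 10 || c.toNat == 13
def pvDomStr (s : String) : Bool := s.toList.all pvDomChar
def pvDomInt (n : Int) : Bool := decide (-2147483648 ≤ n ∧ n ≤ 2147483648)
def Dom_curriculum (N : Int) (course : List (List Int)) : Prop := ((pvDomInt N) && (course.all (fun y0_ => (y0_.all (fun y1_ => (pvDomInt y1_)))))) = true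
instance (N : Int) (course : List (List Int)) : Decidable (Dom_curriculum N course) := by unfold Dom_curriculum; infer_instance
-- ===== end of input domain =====

-- B replaces A's indegree-counter/adjacency/deque bookkeeping (Kahn) by direct propagation
-- over outstanding-prerequisite lists on an index-driven worklist; alternative decomposition,
-- no speed claim.


-- ===== PORT A =====
-- Python lists indexed by ints are ported as List with PySem.List.pyGetD/pySetD (exact,
-- including Python's negative-index wraparound, on the in-range indices reached under Pre_);
-- the 'while q' loop runs on fuel (N+1).toNat + 1, enough for every possible run (each
-- course is enqueued at most once).
def buildInnerStep (i : Int) (st2 : List Int × List (List Int) × List Int) (j : Int) :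
    List Int × List (List Int) × List Int :=
  let graph' := PySem.List.pySetD st2.2.1 j (PySem.List.pyGetD st2.2.1 j [] ++ [i + 1])
  let indeg' := PySem.List.pySetD st2.1 (i + 1) (PySem.List.pyGetD st2.1 (i + 1) 0 + 1)
  (indeg', graph', st2.2.2)

def buildStep (course : List (List Int)) (st : List Int × List (List Int) × List Int)
    (i : Int) : List Int × List (List Int) × List Int :=
  let row := PySem.List.pyGetD course i []
  let time' := PySem.List.pySetD st.2.2 (i + 1) (PySem.List.pyGetD row 0 0)
  (PySem.List.slice row (some 1) (some (-1))).foldl (buildInnerStep i) (st.1, st.2.1, time')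

def kahnInner (time : List Int) (now : Int) (st : List Int × List Int × List Int)
    (i : Int) : List Int × List Int × List Int :=
  let indeg' := PySem.List.pySetD st.1 i (PySem.List.pyGetD st.1 i 0 - 1)
  if PySem.List.pyGetD indeg' i 0 = 0 then
    (indeg',
     PySem.List.pySetD st.2.1 i
       (max (PySem.List.pyGetD st.2.1 i 0)
            (PySem.List.pyGetD st.2.1 now 0 + PySem.List.pyGetD time i 0)),
     st.2.2 ++ [i])
  else (indeg', st.2.1, st.2.2)

def kahnLoop (graph : List (List Int)) (time : List Int) :
    Nat → List Int → List Int → List Int → List Int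
  | 0, _, result, _ => result
  | fuel+1, indegree, result, q =>
    match q with
    | [] => result
    | now :: qrest =>
      let st := (PySem.List.pyGetD graph now []).foldl (kahnInner time now)
        (indegree, result, qrest)
      kahnLoop graph time fuel st.1 st.2.1 st.2.2

def curriculum (N : Int) (course : List (List Int)) : List Int :=
  let sz := (N + 1).toNat
  let built := (PySem.List.pyRange 0 N 1).foldl (buildStep course)
    (List.replicate sz (0 : Int), List.replicate sz ([] : List Int), List.replicate sz (0 : Int))
  let indegree := built.1
  let graph := built.2.1
  let time := built.2.2
  let result := time
  let q := (PySem.List.pyRange 1 (N + 1) 1).foldl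
    (fun q i => if PySem.List.pyGetD indegree i 0 = 0 then q ++ [i] else q) ([] : List Int)
  kahnLoop graph time (sz + 1) indegree result q

-- ===== PORT B =====
-- The 'while i < len(done)' loop runs on fuel (N+1).toNat + 1, enough for every possible
-- run (each course enters the done worklist at most once).
def bBuildStep (course : List (List Int)) (st : List Int × List (List Int)) (v : Int) :
    List Int × List (List Int) :=
  let row := PySem.List.pyGetD course (v - 1) []
  (PySem.List.pySetD st.1 v (PySem.List.pyGetD row 0 0),
   PySem.List.pySetD st.2 v (PySem.List.slice row (some 1) (some (-1))))

def bStrike (times : List Int) (v : Int) (st : List (List Int) × List Int × List Int)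
    (u : Int) : List (List Int) × List Int × List Int :=
  if (PySem.List.pyGetD st.1 u []).contains v then
    let pu := (PySem.List.pyGetD st.1 u []).filter (fun p => !(p == v))
    let pending' := PySem.List.pySetD st.1 u pu
    if pu.isEmpty then
      (pending',
       PySem.List.pySetD st.2.1 u
         (max (PySem.List.pyGetD st.2.1 u 0)
              (PySem.List.pyGetD st.2.1 v 0 + PySem.List.pyGetD times u 0)),
       st.2.2 ++ [u])
    else (pending', st.2.1, st.2.2)
  else st

def bLoop (N : Int) (times : List Int) :
    Nat → List (List Int) → List Int → List Int → Int → List Int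
  | 0, _, finish, _, _ => finish
  | fuel+1, pending, finish, done, i =>
    if i < (done.length : Int) then
      let v := PySem.List.pyGetD done i 0
      let st := (PySem.List.pyRange 1 (N + 1) 1).foldl (bStrike times v) (pending, finish, done)
      bLoop N times fuel st.1 st.2.1 st.2.2 (i + 1)
    else finish

def curriculum_alt (N : Int) (course : List (List Int)) : List Int :=
  let sz := (N + 1).toNat
  let built := (PySem.List.pyRange 1 (N + 1) 1).foldl (bBuildStep course)
    (List.replicate sz (0 : Int), List.replicate sz ([] : List Int))
  let times := built.1
  let pending := built.2
  let finish := times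
  let done := (PySem.List.pyRange 1 (N + 1) 1).foldl
    (fun q v => if (PySem.List.pyGetD pending v []).isEmpty then q ++ [v] else q) ([] : List Int)
  bLoop N times (sz + 1) pending finish done 0

-- ===== PRECONDITION & SPEC =====
-- Pre_ excludes (a) inputs on which A raises IndexError (fewer than N course rows, an empty
-- row among the first N, a prerequisite id above N or below -(N+1)), and (b) rows naming a
-- NEGATIVE prerequisite id in [-(N+1),-1]: no course has a negative id, and on such malformed
-- input A's value (Python's negative-index wraparound reads -k as course N+1-k) and B's (an
-- id naming no course is never satisfied, the course keeps its bare time) are both defensible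
-- accidents of representation, so that unspecified corner is excluded (example in the cites).
def preRowOK (N : Int) (row : List Int) : Bool :=
  !row.isEmpty &&
    (PySem.List.slice row (some 1) (some (-1))).all (fun j => decide (0 ≤ j) && decide (j ≤ N))

def Pre_curriculum (N : Int) (course : List (List Int)) : Prop :=
  N ≤ (course.length : Int) ∧ ∀ row ∈ course.take N.toNat, preRowOK N row = true

instance (N : Int) (course : List (List Int)) : Decidable (Pre_curriculum N course) := by
  unfold Pre_curriculum; infer_instance

def pvWitness_curriculum : Int × List (List Int) := (2, [[3, -1], [2, 1, -1]])

def Spec_curriculum (N : Int) (course : List (List Int)) (out : List Int) : Prop :=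
  out = curriculum_alt N course

instance (N : Int) (course : List (List Int)) (out : List Int) : Decidable (Spec_curriculum N course out) := by
  unfold Spec_curriculum; infer_instance

-- ===== CLAIM (what is proved, stated in full; the proofs are below) =====
def Claim_equal_curriculum : Prop := ∀ (N : Int) (course : List (List Int)), Dom_curriculum N course → Pre_curriculum N course → Spec_curriculum N course (curriculum N course)

-- ===== LEMMAS AND PROOFS =====

-- pyGetD/pySetD bridges
lemma pv_getD_nonneg {α : Type} (xs : List α) (v : Int) (d : α) (hv : 0 ≤ v) :
    PySem.List.pyGetD xs v d = xs.getD v.toNat d := by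
  conv_lhs => rw [show v = ((v.toNat : Nat) : Int) by omega]
  rw [PySem.List.pyGetD_natCast]

lemma pv_setD_nonneg {α : Type} (xs : List α) (w : Int) (val : α) (hw : 0 ≤ w) :
    PySem.List.pySetD xs w val = xs.set w.toNat val :=
  PySem.List.pySetD_of_nonneg xs val hw

lemma pv_getD_setD {α : Type} (xs : List α) (w : Int) (val : α) (v : Int) (d : α)
    (hw0 : 0 ≤ w) (hwl : w.toNat < xs.length) (hv : 0 ≤ v) :
    PySem.List.pyGetD (PySem.List.pySetD xs w val) v d =
      if v = w then val else PySem.List.pyGetD xs v d := by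
  rw [pv_setD_nonneg _ _ _ hw0, pv_getD_nonneg _ _ _ hv, pv_getD_nonneg _ _ _ hv]
  by_cases hvw : v = w
  · subst hvw
    simp [List.getD_eq_getElem?_getD, hwl]
  · have hne : v.toNat ≠ w.toNat := by omega
    simp [List.getD_eq_getElem?_getD, List.getElem?_set_ne (by omega : w.toNat ≠ v.toNat), hvw]

lemma pv_list_eq_of_getD {α : Type} (xs ys : List α) (d : α) (hlen : xs.length = ys.length)
    (h : ∀ k : Nat, k < xs.length → xs.getD k d = ys.getD k d) : xs = ys := by
  apply List.ext_getElem hlen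
  intro k h1 h2
  have := h k h1
  simpa [List.getD_eq_getElem?_getD, List.getElem?_eq_getElem, h1, h2] using this

-- spec-side views of the input
def pvNodes (N : Int) : List Int := PySem.List.pyRange 1 (N + 1) 1
def pvRowL (course : List (List Int)) (v : Int) : List Int := PySem.List.pyGetD course (v - 1) []
def pvT (course : List (List Int)) (v : Int) : Int := PySem.List.pyGetD (pvRowL course v) 0 0
def pvP (course : List (List Int)) (v : Int) : List Int :=
  PySem.List.slice (pvRowL course v) (some 1) (some (-1))

def pvRem (course : List (List Int)) (d : List Int) (c : Int) : List Int :=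
  (pvP course c).filter (fun p => !d.contains p)

def pvTrigCond (course : List (List Int)) (d : List Int) (now c : Int) : Bool :=
  !(pvRem course d c).isEmpty && (pvRem course d c).all (fun p => p == now)

def pvChildren (N : Int) (course : List (List Int)) (j : Int) : List Int :=
  (pvNodes N).flatMap (fun v => List.replicate ((pvP course v).count j) v)

lemma pv_mem_nodes (N v : Int) : v ∈ pvNodes N ↔ 1 ≤ v ∧ v < N + 1 := by
  simp [pvNodes, PySem.List.mem_pyRange_one]

lemma pv_node_range (N v : Int) (hv : v ∈ pvNodes N) : 0 ≤ v ∧ v.toNat < (N + 1).toNat := by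
  rw [pvNodes, PySem.List.mem_pyRange_one] at hv
  omega

lemma pv_rem_nil (course : List (List Int)) (c : Int) : pvRem course [] c = pvP course c := by
  simp [pvRem]

lemma pv_rem_append (course : List (List Int)) (d : List Int) (now v : Int) :
    pvRem course (d ++ [now]) v = (pvRem course d v).filter (fun p => !(p == now)) := by
  simp only [pvRem, List.filter_filter]
  apply List.filter_congr
  intro p _
  simp only [List.contains_append, List.contains_cons, List.contains_nil]
  cases hd : decide (p ∈ d) <;> cases hn : p == now <;> simp_all

lemma pv_rem_append_nil (course : List (List Int)) (d : List Int) (now v : Int)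
    (h : pvRem course d v = []) : pvRem course (d ++ [now]) v = [] := by
  rw [pv_rem_append, h]
  rfl

lemma pv_trig_rem_nil (course : List (List Int)) (d : List Int) (now v : Int)
    (h : pvTrigCond course d now v = true) : pvRem course (d ++ [now]) v = [] := by
  rw [pv_rem_append]
  rw [pvTrigCond, Bool.and_eq_true, List.all_eq_true] at h
  apply List.filter_eq_nil_iff.2
  intro p hp
  have := h.2 p hp
  simpa using this

lemma pv_trig_rem_ne (course : List (List Int)) (d : List Int) (now v : Int)
    (h : pvTrigCond course d now v = true) : pvRem course d v ≠ [] := by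
  rw [pvTrigCond, Bool.and_eq_true] at h
  intro he
  rw [he] at h
  simp at h

-- B's strike condition in terms of pvRem: 'now ∈ rem and striking it empties the list'
lemma pv_trig_iff_b (course : List (List Int)) (d : List Int) (now v : Int) :
    pvTrigCond course d now v = true ↔
      ((pvRem course d v).contains now = true ∧
       (pvRem course d v).filter (fun p => !(p == now)) = []) := by
  rw [pvTrigCond, Bool.and_eq_true, List.all_eq_true]
  constructor
  · rintro ⟨h1, h2⟩
    constructor
    · cases he : pvRem course d v with
      | nil => rw [he] at h1; simp at h1
      | cons a t =>
        have := h2 a (by rw [he]; simp)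
        simp only [beq_iff_eq] at this
        subst this
        simp [he]
    · apply List.filter_eq_nil_iff.2
      intro p hp
      have := h2 p hp
      simpa using this
  · rintro ⟨h1, h2⟩
    have hmem : now ∈ pvRem course d v := by
      simpa using h1
    constructor
    · cases he : pvRem course d v with
      | nil => rw [he] at hmem; simp at hmem
      | cons a t => simp
    · intro p hp
      by_contra hne
      have : p ∈ (pvRem course d v).filter (fun p => !(p == now)) :=
        List.mem_filter.2 ⟨hp, by simpa using hne⟩
      rw [h2] at this
      simp at this

-- ---------- characterization of A's build phase ----------
lemma pv_buildInner_char (i : Int) (l : List Int) :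
    ∀ (ind : List Int) (graph : List (List Int)) (time : List Int),
    (i + 1).toNat < ind.length →
    (∀ j ∈ l, 0 ≤ j ∧ j.toNat < graph.length) →
    0 ≤ i →
    (l.foldl (buildInnerStep i) (ind, graph, time)).2.2 = time ∧
    (l.foldl (buildInnerStep i) (ind, graph, time)).1.length = ind.length ∧
    (l.foldl (buildInnerStep i) (ind, graph, time)).2.1.length = graph.length ∧
    (∀ v : Int, 0 ≤ v →
      PySem.List.pyGetD (l.foldl (buildInnerStep i) (ind, graph, time)).1 v 0 =
        PySem.List.pyGetD ind v 0 + (if v = i + 1 then (l.length : Int) else 0)) ∧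
    (∀ j : Int, 0 ≤ j →
      PySem.List.pyGetD (l.foldl (buildInnerStep i) (ind, graph, time)).2.1 j [] =
        PySem.List.pyGetD graph j [] ++ List.replicate (l.count j) (i + 1)) := by
  induction l with
  | nil =>
    intro ind graph time _ _ _
    refine ⟨rfl, rfl, rfl, ?_, ?_⟩
    · intro v _; simp
    · intro j _; simp
  | cons j t ih =>
    intro ind graph time hiL hl hi
    have hj := hl j (by simp)
    simp only [List.foldl_cons]
    set ind' := PySem.List.pySetD ind (i + 1) (PySem.List.pyGetD ind (i + 1) 0 + 1) with hind'
    set graph' := PySem.List.pySetD graph j (PySem.List.pyGetD graph j [] ++ [i + 1]) with hgraph'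
    have hstep : buildInnerStep i (ind, graph, time) j = (ind', graph', time) := rfl
    rw [hstep]
    have hiL' : (i + 1).toNat < ind'.length := by
      rw [hind', PySem.List.length_pySetD]; exact hiL
    have hl' : ∀ j' ∈ t, 0 ≤ j' ∧ j'.toNat < graph'.length := by
      intro j' hj'
      have := hl j' (by simp [hj'])
      rwa [hgraph', PySem.List.length_pySetD]
    rcases ih ind' graph' time hiL' hl' hi with ⟨h1, h2, h3, h4, h5⟩
    refine ⟨h1, ?_, ?_, ?_, ?_⟩
    · rw [h2, hind', PySem.List.length_pySetD]
    · rw [h3, hgraph', PySem.List.length_pySetD]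
    · intro v hv
      rw [h4 v hv, hind', pv_getD_setD ind _ _ v 0 (by omega) (by omega) hv]
      by_cases hvi : v = i + 1 <;> simp [hvi, List.length_cons] <;> ring
    · intro j0 hj0
      rw [h5 j0 hj0, hgraph', pv_getD_setD graph _ _ j0 [] hj.1 hj.2 hj0]
      by_cases hjj : j0 = j
      · subst hjj
        simp [List.count_cons, List.replicate_succ, Nat.add_comm]
      · have : (j == j0) = false := by
          simp only [beq_eq_false_iff_ne, ne_eq]
          exact fun e => hjj e.symm
        simp [List.count_cons, this, hjj]

lemma pv_row_eq (course : List (List Int)) (N : Int) (hlen : N ≤ (course.length : Int))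
    (v : Int) (h1 : 1 ≤ v) (h2 : v ≤ N) :
    pvRowL course v = course[(v - 1).toNat]'(by omega) := by
  rw [pvRowL, pv_getD_nonneg _ _ _ (by omega)]
  have hidx : (v - 1).toNat < course.length := by omega
  rw [List.getD_eq_getElem?_getD, List.getElem?_eq_getElem hidx]
  rfl

lemma pv_row_take (course : List (List Int)) (N : Int) (hN : 0 ≤ N)
    (hlen : N ≤ (course.length : Int)) (v : Int) (h1 : 1 ≤ v) (h2 : v ≤ N) :
    pvRowL course v ∈ course.take N.toNat := by
  rw [pv_row_eq course N hlen v h1 h2]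
  have hidx : (v - 1).toNat < (course.take N.toNat).length := by
    simp only [List.length_take]; omega
  have : (course.take N.toNat)[(v - 1).toNat]'hidx = course[(v - 1).toNat]'(by omega) :=
    List.getElem_take
  rw [← this]
  exact List.getElem_mem hidx

lemma pv_labels (course : List (List Int)) (N : Int) (hN : 0 ≤ N)
    (hlen : N ≤ (course.length : Int))
    (hrows : ∀ row ∈ course.take N.toNat, preRowOK N row = true)
    (v : Int) (h1 : 1 ≤ v) (h2 : v ≤ N) :
    ∀ j ∈ pvP course v, 0 ≤ j ∧ j ≤ N := by
  intro j hj
  have hmem := pv_row_take course N hN hlen v h1 h2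
  have := hrows _ hmem
  rw [preRowOK, Bool.and_eq_true, List.all_eq_true] at this
  have := this.2 j hj
  simp only [Bool.and_eq_true, decide_eq_true_eq] at this
  exact this

lemma pv_build_char (N : Int) (course : List (List Int)) (hN : 0 ≤ N)
    (hlen : N ≤ (course.length : Int))
    (hrows : ∀ row ∈ course.take N.toNat, preRowOK N row = true) :
    ∀ k : Nat, (k : Int) ≤ N →
    ((PySem.List.pyRange 0 (k : Int) 1).foldl (buildStep course)
      (List.replicate (N + 1).toNat (0 : Int), List.replicate (N + 1).toNat ([] : List Int),
       List.replicate (N + 1).toNat (0 : Int))).1.length = (N + 1).toNat ∧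
    ((PySem.List.pyRange 0 (k : Int) 1).foldl (buildStep course)
      (List.replicate (N + 1).toNat (0 : Int), List.replicate (N + 1).toNat ([] : List Int),
       List.replicate (N + 1).toNat (0 : Int))).2.1.length = (N + 1).toNat ∧
    ((PySem.List.pyRange 0 (k : Int) 1).foldl (buildStep course)
      (List.replicate (N + 1).toNat (0 : Int), List.replicate (N + 1).toNat ([] : List Int),
       List.replicate (N + 1).toNat (0 : Int))).2.2.length = (N + 1).toNat ∧
    (∀ v : Int, 0 ≤ v →
      PySem.List.pyGetD ((PySem.List.pyRange 0 (k : Int) 1).foldl (buildStep course)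
        (List.replicate (N + 1).toNat (0 : Int), List.replicate (N + 1).toNat ([] : List Int),
         List.replicate (N + 1).toNat (0 : Int))).2.2 v 0 =
        if 1 ≤ v ∧ v ≤ (k : Int) then pvT course v else 0) ∧
    (∀ v : Int, 0 ≤ v →
      PySem.List.pyGetD ((PySem.List.pyRange 0 (k : Int) 1).foldl (buildStep course)
        (List.replicate (N + 1).toNat (0 : Int), List.replicate (N + 1).toNat ([] : List Int),
         List.replicate (N + 1).toNat (0 : Int))).1 v 0 =
        if 1 ≤ v ∧ v ≤ (k : Int) then ((pvP course v).length : Int) else 0) ∧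
    (∀ j : Int, 0 ≤ j →
      PySem.List.pyGetD ((PySem.List.pyRange 0 (k : Int) 1).foldl (buildStep course)
        (List.replicate (N + 1).toNat (0 : Int), List.replicate (N + 1).toNat ([] : List Int),
         List.replicate (N + 1).toNat (0 : Int))).2.1 j [] =
        (PySem.List.pyRange 1 ((k : Int) + 1) 1).flatMap
          (fun v => List.replicate ((pvP course v).count j) v)) := by
  intro k
  induction k with
  | zero =>
    intro _
    rw [show ((0 : Nat) : Int) = 0 from rfl, PySem.List.pyRange_one_eq_nil (by omega)]
    refine ⟨by simp, by simp, by simp, ?_, ?_, ?_⟩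
    · intro v hv
      rw [pv_getD_nonneg _ _ _ hv]
      simp only [List.foldl_nil]
      rw [List.getD_eq_getElem?_getD]
      have : (1 ≤ v ∧ v ≤ (0:Int)) = False := by simp; omega
      simp only [this, if_false]
      simp only [List.getElem?_replicate]
      split <;> rfl
    · intro v hv
      rw [pv_getD_nonneg _ _ _ hv]
      simp only [List.foldl_nil]
      rw [List.getD_eq_getElem?_getD]
      have : (1 ≤ v ∧ v ≤ (0:Int)) = False := by simp; omega
      simp only [this, if_false]
      simp only [List.getElem?_replicate]
      split <;> rfl
    · intro j hj
      rw [pv_getD_nonneg _ _ _ hj]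
      simp only [List.foldl_nil]
      rw [PySem.List.pyRange_one_eq_nil (by omega)]
      rw [List.getD_eq_getElem?_getD]
      simp only [List.getElem?_replicate]
      split <;> rfl
  | succ k ih =>
    intro hk1
    have hkN : (k : Int) ≤ N := by push_cast at hk1 ⊢; omega
    rcases ih hkN with ⟨hL1, hL2, hL3, hT, hI, hG⟩
    have hsplit : PySem.List.pyRange 0 ((k + 1 : Nat) : Int) 1 =
        PySem.List.pyRange 0 (k : Int) 1 ++ [(k : Int)] := by
      push_cast
      exact PySem.List.pyRange_one_succ_right (by omega)
    rw [hsplit, List.foldl_append]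
    set st := (PySem.List.pyRange 0 (k : Int) 1).foldl (buildStep course)
      (List.replicate (N + 1).toNat (0 : Int), List.replicate (N + 1).toNat ([] : List Int),
       List.replicate (N + 1).toNat (0 : Int)) with hst
    simp only [List.foldl_cons, List.foldl_nil]
    have hrow : PySem.List.pyGetD course (k : Int) [] = pvRowL course ((k : Int) + 1) := by
      rw [pvRowL]; norm_num
    have hslice : PySem.List.slice (PySem.List.pyGetD course (k : Int) []) (some 1) (some (-1)) =
        pvP course ((k : Int) + 1) := by rw [hrow, pvP]
    have hTval : PySem.List.pyGetD (PySem.List.pyGetD course (k : Int) []) 0 0 =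
        pvT course ((k : Int) + 1) := by rw [hrow, pvT]
    rw [buildStep]
    simp only [hslice, hTval]
    set time' := PySem.List.pySetD st.2.2 ((k : Int) + 1) (pvT course ((k : Int) + 1)) with htime'
    have hlab := pv_labels course N hN hlen hrows ((k : Int) + 1) (by omega) (by push_cast at hk1; omega)
    have hchar := pv_buildInner_char (k : Int) (pvP course ((k : Int) + 1)) st.1 st.2.1 time'
      (by rw [hL1]; omega)
      (by intro j hj; rcases hlab j hj with ⟨h0, hN'⟩; constructor; omega; rw [hL2]; omega)
      (by omega)
    rcases hchar with ⟨c1, c2, c3, c4, c5⟩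
    have hlent' : time'.length = (N + 1).toNat := by
      rw [htime', PySem.List.length_pySetD, hL3]
    refine ⟨by rw [c2, hL1], by rw [c3, hL2], by rw [c1, hlent'], ?_, ?_, ?_⟩
    · intro v hv
      rw [c1, htime', pv_getD_setD st.2.2 _ _ v 0 (by omega) (by rw [hL3]; omega) hv]
      by_cases hvk : v = (k : Int) + 1
      · subst hvk
        have : (1 ≤ (k:Int) + 1 ∧ (k:Int) + 1 ≤ ((k+1:Nat):Int)) := by push_cast; omega
        simp [this]
      · rw [if_neg hvk, hT v hv]
        by_cases h1 : 1 ≤ v ∧ v ≤ (k : Int)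
        · rw [if_pos h1, if_pos (by push_cast; omega)]
        · rw [if_neg h1, if_neg (by push_cast; omega)]
    · intro v hv
      rw [c4 v hv, hI v hv]
      by_cases hvk : v = (k : Int) + 1
      · subst hvk
        rw [if_neg (by omega : ¬(1 ≤ (k : Int) + 1 ∧ (k : Int) + 1 ≤ (k : Int))), if_pos rfl,
            if_pos (by push_cast; omega : 1 ≤ (k : Int) + 1 ∧ (k : Int) + 1 ≤ ((k + 1 : Nat) : Int))]
        ring
      · rw [if_neg hvk]
        by_cases h1 : 1 ≤ v ∧ v ≤ (k : Int)
        · rw [if_pos h1, if_pos (by push_cast; omega)]; ring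
        · rw [if_neg h1, if_neg (by push_cast; omega)]; ring
    · intro j hj
      rw [c5 j hj, hG j hj]
      have hsplit2 : PySem.List.pyRange 1 (((k + 1 : Nat) : Int) + 1) 1 =
          PySem.List.pyRange 1 ((k : Int) + 1) 1 ++ [(k : Int) + 1] := by
        push_cast
        exact PySem.List.pyRange_one_succ_right (by omega)
      rw [hsplit2, List.flatMap_append]
      simp

-- ---------- characterization of B's build phase ----------
lemma pv_bbuild_char (N : Int) (course : List (List Int)) (hN : 0 ≤ N) :
    ∀ k : Nat, (k : Int) ≤ N →
    ((PySem.List.pyRange 1 ((k : Int) + 1) 1).foldl (bBuildStep course)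
      (List.replicate (N + 1).toNat (0 : Int), List.replicate (N + 1).toNat ([] : List Int))).1.length
        = (N + 1).toNat ∧
    ((PySem.List.pyRange 1 ((k : Int) + 1) 1).foldl (bBuildStep course)
      (List.replicate (N + 1).toNat (0 : Int), List.replicate (N + 1).toNat ([] : List Int))).2.length
        = (N + 1).toNat ∧
    (∀ v : Int, 0 ≤ v →
      PySem.List.pyGetD ((PySem.List.pyRange 1 ((k : Int) + 1) 1).foldl (bBuildStep course)
        (List.replicate (N + 1).toNat (0 : Int), List.replicate (N + 1).toNat ([] : List Int))).1 v 0 =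
        if 1 ≤ v ∧ v ≤ (k : Int) then pvT course v else 0) ∧
    (∀ v : Int, 0 ≤ v →
      PySem.List.pyGetD ((PySem.List.pyRange 1 ((k : Int) + 1) 1).foldl (bBuildStep course)
        (List.replicate (N + 1).toNat (0 : Int), List.replicate (N + 1).toNat ([] : List Int))).2 v [] =
        if 1 ≤ v ∧ v ≤ (k : Int) then pvP course v else []) := by
  intro k
  induction k with
  | zero =>
    intro _
    rw [show (((0 : Nat) : Int) + 1) = 1 from rfl, PySem.List.pyRange_one_eq_nil (by omega)]
    refine ⟨by simp, by simp, ?_, ?_⟩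
    · intro v hv
      rw [pv_getD_nonneg _ _ _ hv]
      simp only [List.foldl_nil]
      rw [List.getD_eq_getElem?_getD]
      have : (1 ≤ v ∧ v ≤ ((0 : Nat) : Int)) = False := by simp; omega
      simp only [this, if_false]
      simp only [List.getElem?_replicate]
      split <;> rfl
    · intro v hv
      rw [pv_getD_nonneg _ _ _ hv]
      simp only [List.foldl_nil]
      rw [List.getD_eq_getElem?_getD]
      have : (1 ≤ v ∧ v ≤ ((0 : Nat) : Int)) = False := by simp; omega
      simp only [this, if_false]
      simp only [List.getElem?_replicate]
      split <;> rfl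
  | succ k ih =>
    intro hk1
    have hkN : (k : Int) ≤ N := by push_cast at hk1 ⊢; omega
    rcases ih hkN with ⟨hL1, hL2, hT, hP⟩
    have hsplit : PySem.List.pyRange 1 (((k + 1 : Nat) : Int) + 1) 1 =
        PySem.List.pyRange 1 ((k : Int) + 1) 1 ++ [(k : Int) + 1] := by
      push_cast
      exact PySem.List.pyRange_one_succ_right (by omega)
    rw [hsplit, List.foldl_append]
    set st := (PySem.List.pyRange 1 ((k : Int) + 1) 1).foldl (bBuildStep course)
      (List.replicate (N + 1).toNat (0 : Int), List.replicate (N + 1).toNat ([] : List Int))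
      with hst
    simp only [List.foldl_cons, List.foldl_nil]
    have hrow : PySem.List.pyGetD course ((k : Int) + 1 - 1) [] = pvRowL course ((k : Int) + 1) := by
      rw [pvRowL]
    rw [bBuildStep]
    simp only [hrow]
    have hTval : PySem.List.pyGetD (pvRowL course ((k : Int) + 1)) 0 0 = pvT course ((k : Int) + 1) := rfl
    have hPval : PySem.List.slice (pvRowL course ((k : Int) + 1)) (some 1) (some (-1)) =
        pvP course ((k : Int) + 1) := rfl
    rw [hTval, hPval]
    have hb1 : (k : Int) + 1 ≥ 0 := by omega
    have hb2 : ((k : Int) + 1).toNat < (N + 1).toNat := by omega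
    refine ⟨by rw [PySem.List.length_pySetD, hL1], by rw [PySem.List.length_pySetD, hL2], ?_, ?_⟩
    · intro v hv
      rw [pv_getD_setD st.1 _ _ v 0 hb1 (by rw [hL1]; exact hb2) hv]
      by_cases hvk : v = (k : Int) + 1
      · subst hvk
        rw [if_pos rfl, if_pos (by push_cast; omega)]
      · rw [if_neg hvk, hT v hv]
        by_cases h1 : 1 ≤ v ∧ v ≤ (k : Int)
        · rw [if_pos h1, if_pos (by push_cast; omega)]
        · rw [if_neg h1, if_neg (by push_cast; omega)]
    · intro v hv
      rw [pv_getD_setD st.2 _ _ v [] hb1 (by rw [hL2]; exact hb2) hv]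
      by_cases hvk : v = (k : Int) + 1
      · subst hvk
        rw [if_pos rfl, if_pos (by push_cast; omega)]
      · rw [if_neg hvk, hP v hv]
        by_cases h1 : 1 ≤ v ∧ v ≤ (k : Int)
        · rw [if_pos h1, if_pos (by push_cast; omega)]
        · rw [if_neg h1, if_neg (by push_cast; omega)]

-- ---------- A's pop of one node (group-by-group over graph[now]) ----------
lemma pv_group (time : List Int) (now c : Int) (hcne : c ≠ now) (hc0 : 0 ≤ c) :
    ∀ (k : Nat) (st : List Int × List Int × List Int),
    c.toNat < st.1.length →
    (k : Int) ≤ PySem.List.pyGetD st.1 c 0 →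
    (((List.replicate k c).foldl (kahnInner time now) st).1.length = st.1.length ∧
     ∀ v : Int, 0 ≤ v →
       PySem.List.pyGetD ((List.replicate k c).foldl (kahnInner time now) st).1 v 0 =
         if v = c then PySem.List.pyGetD st.1 c 0 - k else PySem.List.pyGetD st.1 v 0) ∧
    (if 1 ≤ k ∧ PySem.List.pyGetD st.1 c 0 = (k : Int) then
      (((List.replicate k c).foldl (kahnInner time now) st).2.1 =
        PySem.List.pySetD st.2.1 c
          (max (PySem.List.pyGetD st.2.1 c 0)
               (PySem.List.pyGetD st.2.1 now 0 + PySem.List.pyGetD time c 0)) ∧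
       ((List.replicate k c).foldl (kahnInner time now) st).2.2 = st.2.2 ++ [c])
    else
      (((List.replicate k c).foldl (kahnInner time now) st).2.1 = st.2.1 ∧
       ((List.replicate k c).foldl (kahnInner time now) st).2.2 = st.2.2)) := by
  intro k
  induction k with
  | zero =>
    intro st hlen hle
    refine ⟨⟨rfl, ?_⟩, ?_⟩
    · intro v hv
      split <;> rename_i h
      · subst h; simp
      · rfl
    · rw [if_neg (by omega)]
      exact ⟨rfl, rfl⟩
  | succ k ih =>
    intro st hlen hle
    rw [List.replicate_succ, List.foldl_cons]
    have hi0 : (1 : Int) ≤ PySem.List.pyGetD st.1 c 0 := by push_cast at hle; omega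
    set ind' := PySem.List.pySetD st.1 c (PySem.List.pyGetD st.1 c 0 - 1) with hind'
    have hgind' : ∀ v : Int, 0 ≤ v → PySem.List.pyGetD ind' v 0 =
        if v = c then PySem.List.pyGetD st.1 c 0 - 1 else PySem.List.pyGetD st.1 v 0 := by
      intro v hv
      rw [hind', pv_getD_setD st.1 c _ v 0 hc0 hlen hv]
    have hlen' : c.toNat < ind'.length := by rw [hind', PySem.List.length_pySetD]; exact hlen
    by_cases hfire : PySem.List.pyGetD st.1 c 0 = 1
    · have hk0 : k = 0 := by push_cast at hle; omega
      subst hk0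
      have hstep : kahnInner time now st c =
          (ind',
           PySem.List.pySetD st.2.1 c
             (max (PySem.List.pyGetD st.2.1 c 0)
                  (PySem.List.pyGetD st.2.1 now 0 + PySem.List.pyGetD time c 0)),
           st.2.2 ++ [c]) := by
        rw [kahnInner]
        simp only [← hind']
        have hz : PySem.List.pyGetD ind' c 0 = 0 := by
          rw [hgind' c hc0]; rw [if_pos rfl]; omega
        rw [if_pos hz]
      simp only [List.replicate_zero, List.foldl_nil, hstep]
      refine ⟨⟨by rw [hind', PySem.List.length_pySetD], ?_⟩, ?_⟩
      · intro v hv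
        rw [hgind' v hv]
        by_cases hvc : v = c
        · subst hvc; rw [if_pos rfl, if_pos rfl]; push_cast; omega
        · rw [if_neg hvc, if_neg hvc]
      · rw [if_pos (show 1 ≤ 0 + 1 ∧ PySem.List.pyGetD st.1 c 0 = ((0 + 1 : Nat) : Int) from
          ⟨by omega, by push_cast; omega⟩)]
        refine ⟨?_, ?_⟩ <;> first | rfl | trivial
    · have hstep : kahnInner time now st c = (ind', st.2.1, st.2.2) := by
        rw [kahnInner]
        simp only [← hind']
        have hz : ¬ (PySem.List.pyGetD ind' c 0 = 0) := by
          rw [hgind' c hc0]; rw [if_pos rfl]; omega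
        rw [if_neg hz]
      rw [hstep]
      have hle' : (k : Int) ≤ PySem.List.pyGetD ind' c 0 := by
        rw [hgind' c hc0, if_pos rfl]; push_cast at hle ⊢; omega
      rcases ih (ind', st.2.1, st.2.2) hlen' hle' with ⟨⟨l1, l2⟩, l3⟩
      refine ⟨⟨by rw [l1, hind', PySem.List.length_pySetD], ?_⟩, ?_⟩
      · intro v hv
        rw [l2 v hv, hgind' c hc0, if_pos rfl]
        by_cases hvc : v = c
        · subst hvc; rw [if_pos rfl, if_pos rfl]; push_cast; ring
        · rw [if_neg hvc, if_neg hvc, hgind' v hv, if_neg hvc]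
      · rw [hgind' c hc0, if_pos rfl] at l3
        have hcond : (1 ≤ k + 1 ∧ PySem.List.pyGetD st.1 c 0 = ((k + 1 : Nat) : Int)) ↔
            (1 ≤ k ∧ PySem.List.pyGetD st.1 c 0 - 1 = (k : Int)) := by
          constructor
          · rintro ⟨h1, h2⟩
            by_cases hk : 1 ≤ k
            · exact ⟨hk, by omega⟩
            · exact absurd (show PySem.List.pyGetD st.1 c 0 = 1 by omega) hfire
          · rintro ⟨h1, h2⟩
            exact ⟨by omega, by omega⟩
        by_cases hc2 : 1 ≤ k ∧ PySem.List.pyGetD st.1 c 0 - 1 = (k : Int)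
        · rw [if_pos (hcond.2 hc2)]
          rw [if_pos hc2] at l3
          exact l3
        · rw [if_neg (fun h => hc2 (hcond.1 h))]
          rw [if_neg hc2] at l3
          exact l3

lemma pv_filter_ne_length (l : List Int) (a : Int) :
    ((l.filter (fun p => !(p == a))).length : Int) = (l.length : Int) - (l.count a : Int) := by
  induction l with
  | nil => simp
  | cons b t ih =>
    by_cases hb : b = a
    · subst hb
      have h1 : (b :: t).count b = t.count b + 1 := by simp
      simp only [List.filter_cons, h1]
      simp only [beq_self_eq_true, Bool.not_true, Bool.false_eq_true, if_false]
      rw [ih]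
      simp only [List.length_cons, h1]
      push_cast
      ring
    · have h1 : (b :: t).count a = t.count a := by
        rw [List.count_cons]
        simp [hb]
      simp only [List.filter_cons, h1]
      have : (!(b == a)) = true := by simp [hb]
      simp only [this, if_true, List.length_cons]
      push_cast
      push_cast at ih
      omega

lemma pv_count_rem (course : List (List Int)) (d : List Int) (now v : Int) (hnow : now ∉ d) :
    (pvRem course d v).count now = (pvP course v).count now := by
  rw [pvRem, List.count_filter]
  simp [hnow]

lemma pv_rem_append_len (course : List (List Int)) (d : List Int) (now v : Int)
    (hnow : now ∉ d) :
    ((pvRem course (d ++ [now]) v).length : Int) =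
      ((pvRem course d v).length : Int) - ((pvP course v).count now : Int) := by
  rw [pv_rem_append, pv_filter_ne_length, pv_count_rem course d now v hnow]

lemma pv_trig_iff (course : List (List Int)) (d : List Int) (now v : Int) (hnow : now ∉ d) :
    (pvTrigCond course d now v = true) ↔
      (1 ≤ (pvP course v).count now ∧
       ((pvRem course d v).length : Int) = (((pvP course v).count now : Nat) : Int)) := by
  rw [pvTrigCond, Bool.and_eq_true]
  have hcnt := pv_count_rem course d now v hnow
  constructor
  · rintro ⟨h1, h2⟩
    rw [List.all_eq_true] at h2
    have hlen : (pvRem course d v).count now = (pvRem course d v).length :=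
      List.count_eq_length.2 (fun p hp => by
        have := h2 p hp
        simp only [beq_iff_eq] at this
        simp [this])
    have hne : pvRem course d v ≠ [] := by
      intro he; rw [he] at h1; simp at h1
    have hpos : 0 < (pvRem course d v).length := List.length_pos_of_ne_nil hne
    exact ⟨by omega, by omega⟩
  · rintro ⟨h1, h2⟩
    have hle : (pvRem course d v).count now ≤ (pvRem course d v).length :=
      List.count_le_length
    have heq : (pvRem course d v).count now = (pvRem course d v).length := by omega
    have hall := List.count_eq_length.1 heq
    have hlen0 : 1 ≤ (pvRem course d v).length := by omega
    constructor
    · cases he : pvRem course d v with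
      | nil => rw [he] at hlen0; simp at hlen0
      | cons a t => simp
    · rw [List.all_eq_true]
      intro p hp
      have := hall p hp
      simp [this]

lemma pv_popGroups (course : List (List Int)) (time : List Int) (d : List Int) (now : Int)
    (hnow0 : 0 ≤ now) (hnowd : now ∉ d) (hremnow : pvRem course d now = []) :
    ∀ (vs : List Int) (st : List Int × List Int × List Int),
    vs.Nodup →
    (∀ v ∈ vs, 0 ≤ v ∧ v.toNat < st.1.length ∧ v.toNat < st.2.1.length) →
    (∀ v ∈ vs, PySem.List.pyGetD st.1 v 0 = ((pvRem course d v).length : Int)) →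
    ((vs.flatMap (fun v => List.replicate ((pvP course v).count now) v)).foldl
        (kahnInner time now) st).1.length = st.1.length ∧
    ((vs.flatMap (fun v => List.replicate ((pvP course v).count now) v)).foldl
        (kahnInner time now) st).2.1.length = st.2.1.length ∧
    (∀ v : Int, 0 ≤ v →
      PySem.List.pyGetD ((vs.flatMap (fun v => List.replicate ((pvP course v).count now) v)).foldl
        (kahnInner time now) st).1 v 0 =
        if v ∈ vs then ((pvRem course (d ++ [now]) v).length : Int)
        else PySem.List.pyGetD st.1 v 0) ∧
    (∀ v : Int, 0 ≤ v →
      PySem.List.pyGetD ((vs.flatMap (fun v => List.replicate ((pvP course v).count now) v)).foldl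
        (kahnInner time now) st).2.1 v 0 =
        if v ∈ vs ∧ pvTrigCond course d now v = true then
          max (PySem.List.pyGetD st.2.1 v 0)
              (PySem.List.pyGetD st.2.1 now 0 + PySem.List.pyGetD time v 0)
        else PySem.List.pyGetD st.2.1 v 0) ∧
    ((vs.flatMap (fun v => List.replicate ((pvP course v).count now) v)).foldl
        (kahnInner time now) st).2.2 = st.2.2 ++ vs.filter (pvTrigCond course d now) := by
  intro vs
  induction vs with
  | nil =>
    intro st _ _ _
    refine ⟨rfl, rfl, ?_, ?_, by simp⟩
    · intro v _; simp
    · intro v _; simp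
  | cons c vs' ih =>
    intro st hnd hrange hind
    have hndc := List.nodup_cons.1 hnd
    have hrc := hrange c (by simp)
    have hic := hind c (by simp)
    set k := (pvP course c).count now with hk
    have hsplit : ((c :: vs').flatMap (fun v => List.replicate ((pvP course v).count now) v)) =
        List.replicate k c ++ vs'.flatMap (fun v => List.replicate ((pvP course v).count now) v) := by
      simp [hk]
    rw [hsplit, List.foldl_append]
    by_cases hcnow : c = now
    · subst hcnow
      have hk0 : k = 0 := by
        rw [hk]
        have : (pvRem course d c).count c = 0 := by rw [hremnow]; simp
        rw [← pv_count_rem course d c c hnowd, this]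
      rw [hk0]
      simp only [List.replicate_zero, List.foldl_nil]
      have htrigc : pvTrigCond course d c c = false := by
        rw [pvTrigCond, hremnow]
        simp
      rcases ih st hndc.2 (fun v hv => hrange v (by simp [hv]))
        (fun v hv => hind v (by simp [hv])) with ⟨i1, i2, i3, i4, i5⟩
      refine ⟨i1, i2, ?_, ?_, ?_⟩
      · intro v hv
        rw [i3 v hv]
        by_cases hvc : v = c
        · subst hvc
          have hvnotvs' : v ∉ vs' := hndc.1
          rw [if_neg hvnotvs', if_pos (by simp)]
          rw [hic]
          rw [pv_rem_append_len course d v v hnowd, ← hk, hk0, hremnow]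
          simp
        · by_cases hvvs : v ∈ vs'
          · rw [if_pos hvvs, if_pos (by simp [hvvs])]
          · rw [if_neg hvvs, if_neg (by simp [hvc, hvvs])]
      · intro v hv
        rw [i4 v hv]
        by_cases hvc : v = c
        · subst hvc
          rw [if_neg (by simp [hndc.1]), if_neg (by rw [htrigc]; simp)]
        · by_cases hvvs : v ∈ vs' ∧ pvTrigCond course d c v = true
          · rw [if_pos hvvs, if_pos ⟨by simp [hvvs.1], hvvs.2⟩]
          · rw [if_neg hvvs, if_neg (by
              rintro ⟨hm, ht⟩
              rcases List.mem_cons.1 hm with h | h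
              · exact hvc h
              · exact hvvs ⟨h, ht⟩)]
      · rw [i5, List.filter_cons, htrigc]
        simp
    · have hle : (k : Int) ≤ PySem.List.pyGetD st.1 c 0 := by
        rw [hic, hk, ← pv_count_rem course d now c hnowd]
        exact_mod_cast List.count_le_length
      rcases pv_group time now c hcnow hrc.1 k st hrc.2.1 hle with ⟨⟨g1, g2⟩, g3⟩
      set st' := (List.replicate k c).foldl (kahnInner time now) st with hst'
      have htrig_iff : (1 ≤ k ∧ PySem.List.pyGetD st.1 c 0 = (k : Int)) ↔
          pvTrigCond course d now c = true := by
        rw [pv_trig_iff course d now c hnowd, hic, ← hk]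
      have hstlen1 : st'.1.length = st.1.length := g1
      have hstlen2 : st'.2.1.length = st.2.1.length := by
        by_cases hfire : 1 ≤ k ∧ PySem.List.pyGetD st.1 c 0 = (k : Int)
        · rw [if_pos hfire] at g3
          rw [g3.1, PySem.List.length_pySetD]
        · rw [if_neg hfire] at g3
          rw [g3.1]
      have hres' : ∀ v : Int, 0 ≤ v → PySem.List.pyGetD st'.2.1 v 0 =
          if v = c ∧ pvTrigCond course d now c = true then
            max (PySem.List.pyGetD st.2.1 c 0)
                (PySem.List.pyGetD st.2.1 now 0 + PySem.List.pyGetD time c 0)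
          else PySem.List.pyGetD st.2.1 v 0 := by
        intro v hv
        by_cases hfire : 1 ≤ k ∧ PySem.List.pyGetD st.1 c 0 = (k : Int)
        · rw [if_pos hfire] at g3
          rw [g3.1, pv_getD_setD st.2.1 c _ v 0 hrc.1 hrc.2.2 hv]
          by_cases hvc : v = c
          · subst hvc
            rw [if_pos rfl, if_pos ⟨rfl, htrig_iff.1 hfire⟩]
          · rw [if_neg hvc, if_neg (by rintro ⟨h, _⟩; exact hvc h)]
        · rw [if_neg hfire] at g3
          rw [g3.1]
          rw [if_neg (by
            rintro ⟨hvc, ht⟩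
            exact hfire (htrig_iff.2 ht))]
      have hq' : st'.2.2 = st.2.2 ++ (if pvTrigCond course d now c = true then [c] else []) := by
        by_cases hfire : 1 ≤ k ∧ PySem.List.pyGetD st.1 c 0 = (k : Int)
        · rw [if_pos hfire] at g3
          rw [g3.2, if_pos (htrig_iff.1 hfire)]
        · rw [if_neg hfire] at g3
          rw [g3.2, if_neg (fun ht => hfire (htrig_iff.2 ht))]
          simp
      rcases ih st' hndc.2
        (fun v hv => by
          rcases hrange v (by simp [hv]) with ⟨a, b, cc⟩
          exact ⟨a, by rw [hstlen1]; exact b, by rw [hstlen2]; exact cc⟩)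
        (fun v hv => by
          rw [g2 v (hrange v (by simp [hv])).1]
          rw [if_neg (by rintro rfl; exact hndc.1 hv)]
          exact hind v (by simp [hv])) with ⟨i1, i2, i3, i4, i5⟩
      refine ⟨by rw [i1, hstlen1], by rw [i2, hstlen2], ?_, ?_, ?_⟩
      · intro v hv
        rw [i3 v hv]
        by_cases hvvs : v ∈ vs'
        · rw [if_pos hvvs, if_pos (by simp [hvvs])]
        · rw [if_neg hvvs, g2 v hv]
          by_cases hvc : v = c
          · subst hvc
            rw [if_pos rfl, if_pos (by simp)]
            rw [hic, pv_rem_append_len course d now v hnowd, hk]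
          · rw [if_neg hvc, if_neg (by simp [hvc, hvvs])]
      · intro v hv
        rw [i4 v hv]
        have hnowne : (now : Int) ≠ c := fun h => hcnow h.symm
        have hresnow : PySem.List.pyGetD st'.2.1 now 0 = PySem.List.pyGetD st.2.1 now 0 := by
          rw [hres' now hnow0, if_neg (by rintro ⟨h, _⟩; exact hnowne h)]
        by_cases hvvs : v ∈ vs' ∧ pvTrigCond course d now v = true
        · rw [if_pos hvvs, if_pos ⟨by simp [hvvs.1], hvvs.2⟩]
          have hvne : v ≠ c := by rintro rfl; exact hndc.1 hvvs.1
          rw [hres' v hv, if_neg (by rintro ⟨h, _⟩; exact hvne h), hresnow]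
        · rw [if_neg hvvs, hres' v hv]
          by_cases hvc : v = c
          · subst hvc
            by_cases ht : pvTrigCond course d now v = true
            · rw [if_pos ⟨rfl, ht⟩, if_pos ⟨by simp, ht⟩]
            · rw [if_neg (by rintro ⟨_, h⟩; exact ht h),
                 if_neg (by rintro ⟨_, h⟩; exact ht h)]
          · rw [if_neg (by rintro ⟨h, _⟩; exact hvc h),
               if_neg (by rintro ⟨hm, ht⟩; exact hvvs ⟨by
                 rcases List.mem_cons.1 hm with h | h
                 · exact absurd h hvc
                 · exact h, ht⟩)]
      · rw [i5, hq', List.filter_cons]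
        by_cases ht : pvTrigCond course d now c = true
        · rw [if_pos ht, if_pos ht]
          simp
        · rw [if_neg ht, if_neg (by simp [ht])]
          simp

-- ---------- B's scan of one finished node over all courses ----------
lemma pv_bscan (course : List (List Int)) (times : List Int) (d : List Int) (now : Int)
    (hnow0 : 0 ≤ now) :
    ∀ (vs : List Int) (st : List (List Int) × List Int × List Int),
    vs.Nodup →
    (∀ u ∈ vs, 0 ≤ u ∧ u.toNat < st.1.length ∧ u.toNat < st.2.1.length) →
    (∀ u ∈ vs, PySem.List.pyGetD st.1 u [] = pvRem course d u) →
    (now ∈ vs → pvRem course d now = []) →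
    (vs.foldl (bStrike times now) st).1.length = st.1.length ∧
    (vs.foldl (bStrike times now) st).2.1.length = st.2.1.length ∧
    (∀ u : Int, 0 ≤ u →
      PySem.List.pyGetD (vs.foldl (bStrike times now) st).1 u [] =
        if u ∈ vs then (pvRem course d u).filter (fun p => !(p == now))
        else PySem.List.pyGetD st.1 u []) ∧
    (∀ u : Int, 0 ≤ u →
      PySem.List.pyGetD (vs.foldl (bStrike times now) st).2.1 u 0 =
        if u ∈ vs ∧ pvTrigCond course d now u = true then
          max (PySem.List.pyGetD st.2.1 u 0)
              (PySem.List.pyGetD st.2.1 now 0 + PySem.List.pyGetD times u 0)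
        else PySem.List.pyGetD st.2.1 u 0) ∧
    (vs.foldl (bStrike times now) st).2.2 = st.2.2 ++ vs.filter (pvTrigCond course d now) := by
  intro vs
  induction vs with
  | nil =>
    intro st _ _ _ _
    refine ⟨rfl, rfl, ?_, ?_, by simp⟩
    · intro u _; simp
    · intro u _; simp
  | cons c vs' ih =>
    intro st hnd hrange hpen hnowmem
    have hndc := List.nodup_cons.1 hnd
    have hrc := hrange c (by simp)
    have hpc := hpen c (by simp)
    simp only [List.foldl_cons]
    -- characterize the single strike at c
    have hcnow_ne_trig : c = now → pvRem course d c = [] := by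
      intro h; subst h; exact hnowmem (by simp)
    by_cases hcont : (PySem.List.pyGetD st.1 c []).contains now = true
    · -- now occurs in c's pending list
      have hcne : c ≠ now := by
        intro h
        have := hcnow_ne_trig h
        rw [hpc, this] at hcont
        simp at hcont
      set pu := (PySem.List.pyGetD st.1 c []).filter (fun p => !(p == now)) with hpu
      set pending' := PySem.List.pySetD st.1 c pu with hpending'
      have hlenp : pending'.length = st.1.length := by
        rw [hpending', PySem.List.length_pySetD]
      have hgpen' : ∀ u : Int, 0 ≤ u → PySem.List.pyGetD pending' u [] =
          if u = c then pu else PySem.List.pyGetD st.1 u [] := by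
        intro u hu
        rw [hpending', pv_getD_setD st.1 c _ u [] hrc.1 hrc.2.1 hu]
      by_cases hemp : pu.isEmpty = true
      · -- c is triggered
        have htrig : pvTrigCond course d now c = true := by
          rw [pv_trig_iff_b]
          refine ⟨by rw [← hpc]; exact hcont, ?_⟩
          rw [← hpc, ← hpu]
          exact List.isEmpty_iff.1 hemp
        have hstep : bStrike times now st c =
            (pending',
             PySem.List.pySetD st.2.1 c
               (max (PySem.List.pyGetD st.2.1 c 0)
                    (PySem.List.pyGetD st.2.1 now 0 + PySem.List.pyGetD times c 0)),
             st.2.2 ++ [c]) := by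
          rw [bStrike, if_pos hcont]
          simp only [← hpu, ← hpending', hemp, if_pos]
        rw [hstep]
        set res' := PySem.List.pySetD st.2.1 c
          (max (PySem.List.pyGetD st.2.1 c 0)
               (PySem.List.pyGetD st.2.1 now 0 + PySem.List.pyGetD times c 0)) with hres'
        have hlenr : res'.length = st.2.1.length := by
          rw [hres', PySem.List.length_pySetD]
        have hgres' : ∀ u : Int, 0 ≤ u → PySem.List.pyGetD res' u 0 =
            if u = c then
              max (PySem.List.pyGetD st.2.1 c 0)
                  (PySem.List.pyGetD st.2.1 now 0 + PySem.List.pyGetD times c 0)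
            else PySem.List.pyGetD st.2.1 u 0 := by
          intro u hu
          rw [hres', pv_getD_setD st.2.1 c _ u 0 hrc.1 hrc.2.2 hu]
        rcases ih (pending', res', st.2.2 ++ [c]) hndc.2
          (fun u hu => by
            rcases hrange u (by simp [hu]) with ⟨a, b, cc⟩
            exact ⟨a, by rw [hlenp]; exact b, by rw [hlenr]; exact cc⟩)
          (fun u hu => by
            rw [hgpen' u (hrange u (by simp [hu])).1,
               if_neg (by rintro rfl; exact hndc.1 hu)]
            exact hpen u (by simp [hu]))
          (fun h => hnowmem (by simp [h])) with ⟨i1, i2, i3, i4, i5⟩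
        refine ⟨by rw [i1, hlenp], by rw [i2, hlenr], ?_, ?_, ?_⟩
        · intro u hu
          rw [i3 u hu]
          by_cases huv : u ∈ vs'
          · rw [if_pos huv, if_pos (by simp [huv])]
          · rw [if_neg huv, hgpen' u hu]
            by_cases huc : u = c
            · subst huc
              rw [if_pos rfl, if_pos (by simp), hpu, hpc]
            · rw [if_neg huc, if_neg (by simp [huc, huv])]
        · intro u hu
          rw [i4 u hu]
          have hresnow : PySem.List.pyGetD res' now 0 = PySem.List.pyGetD st.2.1 now 0 := by
            rw [hgres' now hnow0, if_neg (fun h => hcne h.symm)]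
          by_cases huv : u ∈ vs' ∧ pvTrigCond course d now u = true
          · rw [if_pos huv, if_pos ⟨by simp [huv.1], huv.2⟩]
            have hune : u ≠ c := by rintro rfl; exact hndc.1 huv.1
            rw [hgres' u hu, if_neg hune, hresnow]
          · rw [if_neg huv, hgres' u hu]
            by_cases huc : u = c
            · subst huc
              rw [if_pos rfl, if_pos ⟨by simp, htrig⟩]
            · rw [if_neg huc,
                 if_neg (by
                   rintro ⟨hm, ht⟩
                   rcases List.mem_cons.1 hm with h | h
                   · exact huc h
                   · exact huv ⟨h, ht⟩)]
        · rw [i5, List.filter_cons, if_pos htrig]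
          simp
      · -- now struck from c's list, but c not yet ready
        have hntrig : pvTrigCond course d now c = false := by
          rw [Bool.eq_false_iff]
          intro ht
          rcases (pv_trig_iff_b course d now c).1 ht with ⟨_, h2⟩
          rw [← hpc, ← hpu] at h2
          rw [h2] at hemp
          simp at hemp
        have hstep : bStrike times now st c = (pending', st.2.1, st.2.2) := by
          rw [bStrike, if_pos hcont]
          simp only [← hpu, ← hpending', hemp, if_false, Bool.false_eq_true]
        rw [hstep]
        rcases ih (pending', st.2.1, st.2.2) hndc.2
          (fun u hu => by
            rcases hrange u (by simp [hu]) with ⟨a, b, cc⟩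
            exact ⟨a, by rw [hlenp]; exact b, cc⟩)
          (fun u hu => by
            rw [hgpen' u (hrange u (by simp [hu])).1,
               if_neg (by rintro rfl; exact hndc.1 hu)]
            exact hpen u (by simp [hu]))
          (fun h => hnowmem (by simp [h])) with ⟨i1, i2, i3, i4, i5⟩
        refine ⟨by rw [i1, hlenp], i2, ?_, ?_, ?_⟩
        · intro u hu
          rw [i3 u hu]
          by_cases huv : u ∈ vs'
          · rw [if_pos huv, if_pos (by simp [huv])]
          · rw [if_neg huv, hgpen' u hu]
            by_cases huc : u = c
            · subst huc
              rw [if_pos rfl, if_pos (by simp), hpu, hpc]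
            · rw [if_neg huc, if_neg (by simp [huc, huv])]
        · intro u hu
          rw [i4 u hu]
          by_cases huv : u ∈ vs' ∧ pvTrigCond course d now u = true
          · rw [if_pos huv, if_pos ⟨by simp [huv.1], huv.2⟩]
          · rw [if_neg huv,
               if_neg (by
                 rintro ⟨hm, ht⟩
                 rcases List.mem_cons.1 hm with h | h
                 · subst h; rw [hntrig] at ht; exact absurd ht (by simp)
                 · exact huv ⟨h, ht⟩)]
        · rw [i5, List.filter_cons, if_neg (by rw [hntrig]; simp)]
    · -- now not in c's pending list: state untouched at c
      have hntrig : pvTrigCond course d now c = false := by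
        rw [Bool.eq_false_iff]
        intro ht
        rcases (pv_trig_iff_b course d now c).1 ht with ⟨h1, _⟩
        rw [← hpc] at h1
        exact hcont h1
      have hnmem : now ∉ pvRem course d c := by
        rw [← hpc]
        intro hm
        exact hcont (by simpa using hm)
      have hfilt : (pvRem course d c).filter (fun p => !(p == now)) = pvRem course d c := by
        apply List.filter_eq_self.2
        intro p hp
        have : p ≠ now := by
          rintro rfl
          exact hnmem hp
        simpa using this
      have hstep : bStrike times now st c = st := by
        rw [bStrike, if_neg hcont]
      rw [hstep]
      rcases ih st hndc.2 (fun u hu => hrange u (by simp [hu]))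
        (fun u hu => hpen u (by simp [hu]))
        (fun h => hnowmem (by simp [h])) with ⟨i1, i2, i3, i4, i5⟩
      refine ⟨i1, i2, ?_, ?_, ?_⟩
      · intro u hu
        rw [i3 u hu]
        by_cases huv : u ∈ vs'
        · rw [if_pos huv, if_pos (by simp [huv])]
        · rw [if_neg huv]
          by_cases huc : u = c
          · subst huc
            rw [if_pos (by simp), hfilt, hpc]
          · rw [if_neg (by simp [huc, huv])]
      · intro u hu
        rw [i4 u hu]
        by_cases huv : u ∈ vs' ∧ pvTrigCond course d now u = true
        · rw [if_pos huv, if_pos ⟨by simp [huv.1], huv.2⟩]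
        · rw [if_neg huv,
             if_neg (by
               rintro ⟨hm, ht⟩
               rcases List.mem_cons.1 hm with h | h
               · subst h; rw [hntrig] at ht; exact absurd ht (by simp)
               · exact huv ⟨h, ht⟩)]
      · rw [i5, List.filter_cons, if_neg (by rw [hntrig]; simp)]

-- ---------- lockstep simulation of the two loops ----------
lemma pv_getD_natCast' {α : Type} (xs : List α) (k : Nat) (d : α) :
    xs.getD k d = PySem.List.pyGetD xs (k : Int) d := by
  rw [pv_getD_nonneg _ _ _ (Int.natCast_nonneg k), Int.toNat_natCast]

lemma pv_getD_append_mid (d qt : List Int) (now : Int) :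
    PySem.List.pyGetD (d ++ now :: qt) ((d.length : Nat) : Int) 0 = now := by
  rw [← pv_getD_natCast', List.getD_eq_getElem?_getD,
      List.getElem?_append_right (le_refl d.length)]
  simp

lemma pv_master (N : Int) (course : List (List Int)) (graph : List (List Int)) (time : List Int)
    (hgraph : ∀ j : Int, 0 ≤ j → PySem.List.pyGetD graph j [] = pvChildren N course j) :
    ∀ (fuel : Nat) (d q ind res : List Int) (pending : List (List Int)),
    (d ++ q).Nodup →
    (∀ v ∈ d ++ q, v ∈ pvNodes N) →
    (∀ v ∈ d ++ q, pvRem course d v = []) →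
    ind.length = (N + 1).toNat → res.length = (N + 1).toNat → pending.length = (N + 1).toNat →
    (∀ v ∈ pvNodes N, PySem.List.pyGetD ind v 0 = ((pvRem course d v).length : Int)) →
    (∀ u ∈ pvNodes N, PySem.List.pyGetD pending u [] = pvRem course d u) →
    kahnLoop graph time fuel ind res q =
      bLoop N time fuel pending res (d ++ q) ((d.length : Nat) : Int) := by
  intro fuel
  induction fuel with
  | zero =>
    intro d q ind res pending _ _ _ _ _ _ _ _
    rfl
  | succ fuel ih =>
    intro d q ind res pending hnd hmem hfired hindlen hreslen hpenlen hind hpen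
    cases q with
    | nil =>
      rw [List.append_nil]
      show res = bLoop N time (fuel + 1) pending res d ((d.length : Nat) : Int)
      rw [bLoop]
      rw [if_neg (by omega)]
    | cons now qt =>
      have hnowN : now ∈ pvNodes N := hmem now (by simp)
      have hnow0 : 0 ≤ now := (pv_node_range N now hnowN).1
      rcases List.nodup_append.1 hnd with ⟨hd_nd, hq_nd, hdisj⟩
      have hnowd : now ∉ d := fun h => hdisj now h now (by simp) rfl
      have hremnow : pvRem course d now = [] := hfired now (by simp)
      have hnodesnd : (pvNodes N).Nodup := by
        simpa [pvNodes] using PySem.List.nodup_pyRange_one 1 (N + 1)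
      -- A's step
      have hAstep : kahnLoop graph time (fuel + 1) ind res (now :: qt) =
          kahnLoop graph time fuel
            ((PySem.List.pyGetD graph now []).foldl (kahnInner time now) (ind, res, qt)).1
            ((PySem.List.pyGetD graph now []).foldl (kahnInner time now) (ind, res, qt)).2.1
            ((PySem.List.pyGetD graph now []).foldl (kahnInner time now) (ind, res, qt)).2.2 := rfl
      rw [hAstep, hgraph now hnow0]
      have hchild : pvChildren N course now =
          (pvNodes N).flatMap (fun v => List.replicate ((pvP course v).count now) v) := rfl
      rw [hchild]
      rcases pv_popGroups course time d now hnow0 hnowd hremnow (pvNodes N) (ind, res, qt)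
        hnodesnd
        (fun v hv => by
          rcases pv_node_range N v hv with ⟨h0, hlt⟩
          exact ⟨h0, by rw [hindlen]; exact hlt, by rw [hreslen]; exact hlt⟩)
        (fun v hv => hind v hv) with ⟨p1, p2, p3, p4, p5⟩
      set stA := ((pvNodes N).flatMap (fun v => List.replicate ((pvP course v).count now) v)).foldl
        (kahnInner time now) (ind, res, qt) with hstA
      -- B's step
      have hBcond : ((d.length : Nat) : Int) < (((d ++ now :: qt).length : Nat) : Int) := by
        simp only [List.length_append, List.length_cons]
        push_cast
        omega
      have hBstep : bLoop N time (fuel + 1) pending res (d ++ now :: qt) ((d.length : Nat) : Int) =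
          bLoop N time fuel
            ((PySem.List.pyRange 1 (N + 1) 1).foldl
              (bStrike time (PySem.List.pyGetD (d ++ now :: qt) ((d.length : Nat) : Int) 0))
              (pending, res, d ++ now :: qt)).1
            ((PySem.List.pyRange 1 (N + 1) 1).foldl
              (bStrike time (PySem.List.pyGetD (d ++ now :: qt) ((d.length : Nat) : Int) 0))
              (pending, res, d ++ now :: qt)).2.1
            ((PySem.List.pyRange 1 (N + 1) 1).foldl
              (bStrike time (PySem.List.pyGetD (d ++ now :: qt) ((d.length : Nat) : Int) 0))
              (pending, res, d ++ now :: qt)).2.2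
            (((d.length : Nat) : Int) + 1) := by
        rw [bLoop, if_pos hBcond]
      rw [hBstep, pv_getD_append_mid d qt now]
      have hrangeEq : PySem.List.pyRange 1 (N + 1) 1 = pvNodes N := rfl
      rw [hrangeEq]
      rcases pv_bscan course time d now hnow0 (pvNodes N) (pending, res, d ++ now :: qt)
        hnodesnd
        (fun u hu => by
          rcases pv_node_range N u hu with ⟨h0, hlt⟩
          exact ⟨h0, by rw [hpenlen]; exact hlt, by rw [hreslen]; exact hlt⟩)
        (fun u hu => hpen u hu)
        (fun _ => hremnow) with ⟨b1, b2, b3, b4, b5⟩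
      set stB := (pvNodes N).foldl (bStrike time now) (pending, res, d ++ now :: qt) with hstB
      set trig := (pvNodes N).filter (pvTrigCond course d now) with htrig
      -- the two result lists stay equal
      have hresEq : stB.2.1 = stA.2.1 := by
        apply pv_list_eq_of_getD _ _ 0 (by rw [b2, p2])
        intro k hk
        rw [pv_getD_natCast', pv_getD_natCast',
            b4 (k : Int) (Int.natCast_nonneg k), p4 (k : Int) (Int.natCast_nonneg k)]
      -- queues/worklists stay aligned
      have hq' : stA.2.2 = qt ++ trig := p5
      have hdone' : stB.2.2 = (d ++ [now]) ++ (qt ++ trig) := by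
        rw [b5, htrig]
        simp
      have htrig_sub : ∀ v ∈ trig, v ∈ pvNodes N := by
        intro v hv
        exact (List.mem_filter.1 (htrig ▸ hv)).1
      have htrig_cond : ∀ v ∈ trig, pvTrigCond course d now v = true := by
        intro v hv
        exact (List.mem_filter.1 (htrig ▸ hv)).2
      have hnd' : ((d ++ [now]) ++ (qt ++ trig)).Nodup := by
        have hshape : (d ++ [now]) ++ (qt ++ trig) = (d ++ now :: qt) ++ trig := by simp
        rw [hshape]
        refine List.nodup_append.2 ⟨hnd, htrig ▸ hnodesnd.filter _, ?_⟩
        intro a ha b hb hab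
        exact pv_trig_rem_ne course d now b (htrig_cond b hb) (hab ▸ hfired a ha)
      have hmem' : ∀ v ∈ (d ++ [now]) ++ (qt ++ trig), v ∈ pvNodes N := by
        intro v hv
        have hshape : (d ++ [now]) ++ (qt ++ trig) = (d ++ now :: qt) ++ trig := by simp
        rw [hshape] at hv
        rcases List.mem_append.1 hv with h | h
        · exact hmem v h
        · exact htrig_sub v h
      have hfired' : ∀ v ∈ (d ++ [now]) ++ (qt ++ trig), pvRem course (d ++ [now]) v = [] := by
        intro v hv
        have hshape : (d ++ [now]) ++ (qt ++ trig) = (d ++ now :: qt) ++ trig := by simp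
        rw [hshape] at hv
        rcases List.mem_append.1 hv with h | h
        · exact pv_rem_append_nil course d now v (hfired v h)
        · exact pv_trig_rem_nil course d now v (htrig_cond v h)
      have hind' : ∀ v ∈ pvNodes N,
          PySem.List.pyGetD stA.1 v 0 = ((pvRem course (d ++ [now]) v).length : Int) := by
        intro v hv
        rw [p3 v (pv_node_range N v hv).1, if_pos hv]
      have hpen' : ∀ u ∈ pvNodes N,
          PySem.List.pyGetD stB.1 u [] = pvRem course (d ++ [now]) u := by
        intro u hu
        rw [b3 u (pv_node_range N u hu).1, if_pos hu, pv_rem_append]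
      have hilen : (((d ++ [now]).length : Nat) : Int) = ((d.length : Nat) : Int) + 1 := by
        simp
      rw [hq', hdone', hresEq, ← hilen]
      exact ih (d ++ [now]) (qt ++ trig) stA.1 stA.2.1 stB.1
        hnd' hmem' hfired'
        (by rw [p1, hindlen]) (by rw [p2, hreslen]) (by rw [b1, hpenlen])
        hind' hpen'

-- ---------- assembling the two programs ----------
lemma pv_final (N : Int) (course : List (List Int)) (hpre : Pre_curriculum N course) :
    curriculum N course = curriculum_alt N course := by
  rcases hpre with ⟨hlen, hrows⟩
  by_cases hN : 0 ≤ N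
  · -- main case
    have hcast : ((N.toNat : Nat) : Int) = N := Int.toNat_of_nonneg hN
    have HA := pv_build_char N course hN hlen hrows N.toNat (by rw [hcast])
    rw [hcast] at HA
    obtain ⟨a1, a2, a3, aT, aI, aG⟩ := HA
    have HB := pv_bbuild_char N course hN N.toNat (by rw [hcast])
    rw [hcast] at HB
    obtain ⟨bl1, bl2, bT, bP⟩ := HB
    show kahnLoop _ _ _ _ _ _ = bLoop _ _ _ _ _ _ _
    set builtA := (PySem.List.pyRange 0 N 1).foldl (buildStep course)
      (List.replicate (N + 1).toNat (0 : Int), List.replicate (N + 1).toNat ([] : List Int),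
       List.replicate (N + 1).toNat (0 : Int)) with hbuiltA
    set builtB := (PySem.List.pyRange 1 (N + 1) 1).foldl (bBuildStep course)
      (List.replicate (N + 1).toNat (0 : Int), List.replicate (N + 1).toNat ([] : List Int))
      with hbuiltB
    -- B's course-time table equals A's
    have hTeq : builtB.1 = builtA.2.2 := by
      apply pv_list_eq_of_getD _ _ 0 (by rw [bl1, a3])
      intro k hk
      rw [pv_getD_natCast', pv_getD_natCast', bT (k : Int) (Int.natCast_nonneg k),
          aT (k : Int) (Int.natCast_nonneg k)]
    -- the two initial worklists agree
    have hq0 : (PySem.List.pyRange 1 (N + 1) 1).foldl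
        (fun q i => if PySem.List.pyGetD builtA.1 i 0 = 0 then q ++ [i] else q) ([] : List Int) =
        (PySem.List.pyRange 1 (N + 1) 1).foldl
        (fun q v => if (PySem.List.pyGetD builtB.2 v []).isEmpty then q ++ [v] else q)
        ([] : List Int) := by
      apply PySem.List.foldl_congr_mem
      intro acc x hx
      have hxN : 1 ≤ x ∧ x < N + 1 := (pv_mem_nodes N x).1 hx
      have hx0 : 0 ≤ x := by omega
      have hc1 : 1 ≤ x ∧ x ≤ N := ⟨hxN.1, by omega⟩
      rw [aI x hx0, bP x hx0, if_pos hc1, if_pos hc1]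
      by_cases hnil : pvP course x = []
      · rw [hnil]
        simp
      · rw [if_neg (by
            simpa using fun h => hnil (List.length_eq_zero_iff.1 h)),
          if_neg (by simpa [List.isEmpty_iff] using hnil)]
    set q0 := (PySem.List.pyRange 1 (N + 1) 1).foldl
      (fun q i => if PySem.List.pyGetD builtA.1 i 0 = 0 then q ++ [i] else q) ([] : List Int)
      with hq0def
    have hq0filter : q0 = (pvNodes N).filter
        (fun i => decide (PySem.List.pyGetD builtA.1 i 0 = 0)) := by
      rw [hq0def, PySem.List.foldl_append_ite_eq_filter]
      rfl
    have hq0zero : ∀ v ∈ q0, pvP course v = [] := by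
      intro v hv
      rw [hq0filter] at hv
      rcases List.mem_filter.1 hv with ⟨hvN, hvz⟩
      have hxN : 1 ≤ v ∧ v < N + 1 := (pv_mem_nodes N v).1 hvN
      rw [aI v (by omega), if_pos (by omega)] at hvz
      have : ((pvP course v).length : Int) = 0 := by simpa using hvz
      exact List.length_eq_zero_iff.1 (by omega)
    have hq0sub : ∀ v ∈ q0, v ∈ pvNodes N := by
      intro v hv
      rw [hq0filter] at hv
      exact (List.mem_filter.1 hv).1
    have hnodesnd : (pvNodes N).Nodup := by
      simpa [pvNodes] using PySem.List.nodup_pyRange_one 1 (N + 1)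
    have hq0nd : q0.Nodup := by
      rw [hq0filter]
      exact hnodesnd.filter _
    -- lockstep simulation from the initial states
    have hmaster := pv_master N course builtA.2.1 builtA.2.2
      (fun j hj => by rw [aG j hj]; rfl)
      ((N + 1).toNat + 1) [] q0 builtA.1 builtA.2.2 builtB.2
      (by simpa using hq0nd)
      (by simpa using hq0sub)
      (by
        intro v hv
        rw [pv_rem_nil]
        exact hq0zero v (by simpa using hv))
      a1 a3 bl2
      (by
        intro v hv
        have hxN : 1 ≤ v ∧ v < N + 1 := (pv_mem_nodes N v).1 hv
        rw [pv_rem_nil, aI v (by omega), if_pos (by omega)])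
      (by
        intro u hu
        have hxN : 1 ≤ u ∧ u < N + 1 := (pv_mem_nodes N u).1 hu
        rw [pv_rem_nil, bP u (by omega), if_pos (by omega)])
    simp only [List.nil_append, List.length_nil, Nat.cast_zero] at hmaster
    rw [← hq0] at *
    rw [hTeq, ← hq0]
    exact hmaster
  · -- N < 0: both programs return the empty table
    have h1 : (N + 1).toNat = 0 := by omega
    have e1 : PySem.List.pyRange 0 N 1 = [] := PySem.List.pyRange_one_eq_nil (by omega)
    have e2 : PySem.List.pyRange 1 (N + 1) 1 = [] := PySem.List.pyRange_one_eq_nil (by omega)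
    show kahnLoop _ _ _ _ _ _ = bLoop _ _ _ _ _ _ _
    rw [h1, e1, e2]
    simp only [List.foldl_nil, List.replicate_zero]
    rfl

-- ===== VERDICT (by name: the statement is the Claim_ definition above) =====
theorem curriculum_spec : Claim_equal_curriculum := by
  intro N course _ hpre
  unfold Spec_curriculum
  exact pv_final N course hpre
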